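-- pv_equiv track=rewrite | github.com/hanamthai/HackerRank | Gaming Array/main.py | gamingArray
-- ===== SOURCE A (Python) =====
-- def gamingArray(arr):
--     # Write your code here
--     name = 0
--     check = arr[0]
--     for i in range(len(arr)-1):
--         if check < arr[i+1]:
--             check = arr[i+1]
--             name += 1
--     if name % 2 == 0:
--         return "BOB"
--     else:
--         return "ANDY"
-- ===== SOURCE B (Python) =====
-- def gamingArray(arr):
--     # Sort-based: an element starts a round (is a left-to-right maximum) iff its
--     # index precedes the index of every element processed before it when indices
--     # are scanned in decreasing order of value (stable sort breaks ties by index,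
--     # so an equal value at a smaller index correctly blocks the later one).
--     # The parity of the number of such rounds decides the winner.
--     best = len(arr)
--     records = 0
--     for i in sorted(range(len(arr)), key=lambda i: -arr[i]):
--         if i < best:
--             best = i
--             records += 1
--     return "BOB" if records % 2 else "ANDY"
-- ===== Notes on version B (the rewrite author's own statement) =====
-- stated objective: alternative
-- what changed: Instead of A's single left-to-right scan carrying a running maximum, B sorts the indices by decreasing value and counts prefix-minima of the resulting index sequence (an index is a game round iff it precedes every larger-or-equal element), then decides by parity; note B also counts the first element as a round, so its parity test is inverted relative to A's.
-- outside the precondition, e.g. on gamingArray([]): A raises IndexError, B returns 'ANDY'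
import Mathlib
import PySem

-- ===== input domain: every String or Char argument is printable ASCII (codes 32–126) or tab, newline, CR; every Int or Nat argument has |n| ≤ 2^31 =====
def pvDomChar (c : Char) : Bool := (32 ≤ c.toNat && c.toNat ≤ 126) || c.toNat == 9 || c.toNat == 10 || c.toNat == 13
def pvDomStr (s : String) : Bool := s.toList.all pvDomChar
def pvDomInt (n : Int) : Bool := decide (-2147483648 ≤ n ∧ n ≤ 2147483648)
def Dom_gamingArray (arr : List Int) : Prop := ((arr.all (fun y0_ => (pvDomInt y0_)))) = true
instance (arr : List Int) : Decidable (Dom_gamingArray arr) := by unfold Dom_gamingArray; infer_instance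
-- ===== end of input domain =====

-- B replaces A's single running-maximum scan by a different algorithm: sort the
-- indices by decreasing value (stable sort, ties by index) and count the
-- prefix-minima of that index sequence — these are exactly the left-to-right
-- maxima — then decide the winner by parity of that count.

-- ===== PORT A =====
def gamingArray (arr : List Int) : String :=
  match PySem.List.pyGet? arr 0 with
  | none => ""   -- IndexError on empty arr; excluded by Pre_gamingArray
  | some c0 =>
    let st := (PySem.List.pyRange 0 ((arr.length : Int) - 1) 1).foldl
      (fun (s : Int × Int) i =>
        if s.2 < PySem.List.pyGetD arr (i + 1) 0 then
          (s.1 + 1, PySem.List.pyGetD arr (i + 1) 0)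
        else s)
      (0, c0)
    if st.1 % 2 = 0 then "BOB" else "ANDY"

-- ===== PORT B =====
def gamingArray_alt (arr : List Int) : String :=
  let idxs := PySem.List.sorted (PySem.List.pyRange 0 (arr.length : Int) 1)
    (fun i => -(PySem.List.pyGetD arr i 0))
  let st := idxs.foldl
    (fun (s : Int × Int) i => if i < s.1 then (i, s.2 + 1) else s)
    ((arr.length : Int), 0)
  if st.2 % 2 ≠ 0 then "BOB" else "ANDY"

-- ===== PRECONDITION & SPEC =====
-- Pre_ excludes only the empty list, on which A raises IndexError reading the first element.
def Pre_gamingArray (arr : List Int) : Prop := arr ≠ []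
instance (arr : List Int) : Decidable (Pre_gamingArray arr) := by unfold Pre_gamingArray; infer_instance
def pvWitness_gamingArray : List Int := [5, 2, 6, 3, 4]

def Spec_gamingArray (arr : List Int) (out : String) : Prop := out = gamingArray_alt arr
instance (arr : List Int) (out : String) : Decidable (Spec_gamingArray arr out) := by unfold Spec_gamingArray; infer_instance

-- ===== CLAIM (what is proved, stated in full; the proofs are below) =====
def Claim_equal_gamingArray : Prop := ∀ (arr : List Int), Dom_gamingArray arr → Pre_gamingArray arr → Spec_gamingArray arr (gamingArray arr)

-- ===== LEMMAS AND PROOFS =====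

/-- Reference count of left-to-right records of `l`, current maximum `c`. -/
def recCount (c : Int) : List Int → Nat
  | [] => 0
  | x :: t => if c < x then recCount x t + 1 else recCount c t

/-- A's loop over the tail computes `recCount`. -/
theorem foldA_recCount (t : List Int) : ∀ (n c : Int),
    (t.foldl (fun (s : Int × Int) x => if s.2 < x then (s.1 + 1, x) else s) (n, c)).1
      = n + (recCount c t : Int) := by
  induction t with
  | nil => intro n c; simp [recCount]
  | cons x t ih =>
    intro n c
    simp only [List.foldl_cons, recCount]
    by_cases h : c < x
    · simp [h, ih]; ring
    · simp [h, ih]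

/-- The order B's stable sort realises on distinct indices: `i` comes
before `j` iff `i`'s key is smaller, or the keys tie and `i` is earlier
(Bool-backed so the `countP` predicates below are decidable). -/
abbrev idxLt (arr : List Int) (i j : Int) : Prop :=
  ((decide (-(PySem.List.pyGetD arr i 0) < -(PySem.List.pyGetD arr j 0))) ||
   ((decide (-(PySem.List.pyGetD arr i 0) = -(PySem.List.pyGetD arr j 0))) && decide (i < j))) = true

theorem idxLt_iff (arr : List Int) (i j : Int) :
    idxLt arr i j ↔
      ((-(PySem.List.pyGetD arr i 0) < -(PySem.List.pyGetD arr j 0)) ∨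
       (-(PySem.List.pyGetD arr i 0) = -(PySem.List.pyGetD arr j 0)) ∧ i < j) := by
  simp [idxLt]

theorem idxLt_asymm (arr : List Int) (i j : Int) :
    idxLt arr i j → idxLt arr j i → False := by
  rw [idxLt_iff, idxLt_iff]
  intro h1 h2
  rcases h1 with h1 | ⟨h1a, h1b⟩ <;> rcases h2 with h2 | ⟨h2a, h2b⟩ <;> omega

/-- Count of strict left-to-right minima below threshold `b` (B's loop). -/
def minCount (b : Int) : List Int → Nat
  | [] => 0
  | x :: t => if x < b then minCount x t + 1 else minCount b t

/-- B's loop computes `minCount`. -/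
theorem foldB_minCount (l : List Int) : ∀ (b c : Int),
    (l.foldl (fun (s : Int × Int) i => if i < s.1 then (i, s.2 + 1) else s) (b, c)).2
      = c + (minCount b l : Int) := by
  induction l with
  | nil => intro b c; simp [minCount]
  | cons x t ih =>
    intro b c
    simp only [List.foldl_cons, minCount]
    by_cases h : x < b
    · simp [h, ih]; ring
    · simp [h, ih]

/-- Inserting an index larger (in original order) than everything present keeps
the accumulator `Pairwise (idxLt arr)`. -/
theorem insertBy_pairwise (arr : List Int) (x : Int) :
    ∀ (l : List Int), l.Pairwise (idxLt arr) → (∀ y ∈ l, y < x) →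
    (PySem.List.insertBy
        (fun a b => decide (-(PySem.List.pyGetD arr a 0) < -(PySem.List.pyGetD arr b 0)))
        x l).Pairwise (idxLt arr) := by
  intro l
  induction l with
  | nil => intro _ _; simp [PySem.List.insertBy]
  | cons y ys ih =>
    intro hp hlt
    have hpy := (List.pairwise_cons.mp hp).1
    have hpys := (List.pairwise_cons.mp hp).2
    simp only [PySem.List.insertBy]
    split_ifs with h
    · -- x :: y :: ys
      have hk : -(PySem.List.pyGetD arr x 0) < -(PySem.List.pyGetD arr y 0) := by
        simpa using h
      refine List.pairwise_cons.mpr ⟨?_, hp⟩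
      intro z hz
      rcases List.mem_cons.mp hz with rfl | hz
      · rw [idxLt_iff]; omega
      · have hyz := (idxLt_iff arr y z).mp (hpy z hz)
        have hzx : z < x := hlt z (by simp [hz])
        rw [idxLt_iff]; omega
    · -- y :: insertBy x ys
      refine List.pairwise_cons.mpr ⟨?_, ih hpys (fun z hz => hlt z (by simp [hz]))⟩
      intro z hz
      rcases (PySem.List.mem_insertBy _ _ _ _).mp hz with rfl | hz
      · have hk : ¬(-(PySem.List.pyGetD arr z 0) < -(PySem.List.pyGetD arr y 0)) := by
          simpa using h
        have hyx : y < z := hlt y (by simp)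
        rw [idxLt_iff]; omega
      · exact hpy z hz

/-- Stability: the sorted index list is `Pairwise (idxLt arr)`. -/
theorem sorted_idx_pairwise (arr : List Int) :
    (PySem.List.sorted (PySem.List.pyRange 0 (arr.length : Int) 1)
      (fun i => -(PySem.List.pyGetD arr i 0))).Pairwise (idxLt arr) := by
  rw [PySem.List.sorted_eq_foldl_insertBy]
  have main : ∀ (src acc : List Int), acc.Pairwise (idxLt arr) →
      src.Pairwise (· < ·) → (∀ y ∈ acc, ∀ x ∈ src, y < x) →
      (src.foldl (fun acc x => PySem.List.insertBy
        (fun a b => decide (-(PySem.List.pyGetD arr a 0) < -(PySem.List.pyGetD arr b 0)))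
        x acc) acc).Pairwise (idxLt arr) := by
    intro src
    induction src with
    | nil => intro acc h _ _; simpa using h
    | cons x t ih =>
      intro acc hacc hsrc hcross
      simp only [List.foldl_cons]
      refine ih _ (insertBy_pairwise arr x acc hacc (fun y hy => hcross y hy x (by simp))) 
        (List.pairwise_cons.mp hsrc).2 ?_
      intro y hy z hz
      rcases (PySem.List.mem_insertBy _ _ _ _).mp hy with rfl | hy
      · exact (List.pairwise_cons.mp hsrc).1 z hz
      · exact hcross y hy z (by simp [hz])
  exact main _ [] (by simp) (PySem.List.pairwise_lt_pyRange_one 0 _) (by simp)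

/-- On a `Pairwise (idxLt arr)` list, `minCount` counts the elements below the
threshold that are smaller than every element the order puts before them. -/
theorem minCount_countP (arr : List Int) :
    ∀ (l : List Int), l.Pairwise (idxLt arr) → ∀ (b : Int),
    minCount b l
      = l.countP (fun j => decide (j < b ∧ ∀ i ∈ l, idxLt arr i j → j < i)) := by
  intro l
  induction l with
  | nil => intro _ _; simp [minCount]
  | cons x t ih =>
    intro hp b
    have hxt := (List.pairwise_cons.mp hp).1
    have hpt := (List.pairwise_cons.mp hp).2
    rw [List.countP_cons]
    have hx : (decide (x < b ∧ ∀ i ∈ x :: t, idxLt arr i x → x < i)) = decide (x < b) := by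
      simp only [decide_eq_decide]
      constructor
      · exact fun ⟨h, _⟩ => h
      · intro h
        refine ⟨h, fun i hi hix => ?_⟩
        rcases List.mem_cons.mp hi with rfl | hi
        · exact absurd hix (fun h' => idxLt_asymm arr i i h' h')
        · exact absurd hix (fun h' => idxLt_asymm arr x i (hxt i hi) h')
    by_cases hb : x < b
    · have hcong : t.countP (fun j => decide (j < b ∧ ∀ i ∈ x :: t, idxLt arr i j → j < i))
          = t.countP (fun j => decide (j < x ∧ ∀ i ∈ t, idxLt arr i j → j < i)) := by
        refine List.countP_congr (fun j hj => ?_)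
        simp only [decide_eq_true_eq]
        constructor
        · intro ⟨h1, h2⟩
          exact ⟨h2 x (List.mem_cons_self) (hxt j hj), fun i hi hij => h2 i (List.mem_cons_of_mem x hi) hij⟩
        · intro ⟨h1, h2⟩
          refine ⟨by omega, fun i hi hij => ?_⟩
          rcases List.mem_cons.mp hi with rfl | hi
          · exact h1
          · exact h2 i hi hij
      rw [hcong, ← ih hpt x, hx]
      simp [minCount, hb]
    · have hcong : t.countP (fun j => decide (j < b ∧ ∀ i ∈ x :: t, idxLt arr i j → j < i))
          = t.countP (fun j => decide (j < b ∧ ∀ i ∈ t, idxLt arr i j → j < i)) := by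
        refine List.countP_congr (fun j hj => ?_)
        simp only [decide_eq_true_eq]
        constructor
        · intro ⟨h1, h2⟩
          exact ⟨h1, fun i hi hij => h2 i (List.mem_cons_of_mem x hi) hij⟩
        · intro ⟨h1, h2⟩
          refine ⟨h1, fun i hi hij => ?_⟩
          rcases List.mem_cons.mp hi with rfl | hi
          · omega
          · exact h2 i hi hij
      rw [hcong, ← ih hpt b, hx]
      simp [minCount, hb]

/-- `j` (a Nat index) is a left-to-right record of `arr`. -/
abbrev natRec (arr : List Int) (j : Nat) : Prop :=
  ∀ i < j, arr.getD i 0 < arr.getD j 0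

/-- Membership in `pyRange 0 n 1`. -/
theorem mem_pyRange_iff (n : Nat) (i : Int) :
    i ∈ PySem.List.pyRange 0 (n : Int) 1 ↔ ∃ k : Nat, k < n ∧ i = (k : Int) := by
  rw [PySem.List.pyRange_one]
  simp only [List.mem_map, List.mem_range]
  constructor
  · rintro ⟨k, hk, rfl⟩; exact ⟨k, by omega, by ring⟩
  · rintro ⟨k, hk, rfl⟩; exact ⟨k, by omega, by ring⟩

/-- For an in-range index, the big "smaller than everything before it in the
sorted order" condition is exactly being a left-to-right record. -/
theorem cond_iff_natRec (arr : List Int) (j : Nat) (hj : j < arr.length) :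
    (((j : Int) < (arr.length : Int) ∧
      ∀ i ∈ PySem.List.pyRange 0 (arr.length : Int) 1, idxLt arr i (j : Int) → (j : Int) < i)
      ↔ natRec arr j) := by
  constructor
  · intro ⟨_, h⟩ i hij
    by_contra hge
    have hi : (i : Int) ∈ PySem.List.pyRange 0 (arr.length : Int) 1 :=
      (mem_pyRange_iff arr.length (i : Int)).mpr ⟨i, by omega, rfl⟩
    have hkey : PySem.List.pyGetD arr (i : Int) 0 = arr.getD i 0 :=
      PySem.List.pyGetD_natCast arr i 0
    have hkeyj : PySem.List.pyGetD arr (j : Int) 0 = arr.getD j 0 :=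
      PySem.List.pyGetD_natCast arr j 0
    have hlt : idxLt arr (i : Int) (j : Int) := by
      rw [idxLt_iff, hkey, hkeyj]
      rcases lt_or_eq_of_le (not_lt.mp hge) with h1 | h1
      · exact Or.inl (by omega)
      · exact Or.inr ⟨by omega, by omega⟩
    have := h (i : Int) hi hlt
    omega
  · intro h
    refine ⟨by omega, fun i hi hij => ?_⟩
    obtain ⟨k, hk, rfl⟩ := (mem_pyRange_iff arr.length i).mp hi
    have hkey : PySem.List.pyGetD arr (k : Int) 0 = arr.getD k 0 :=
      PySem.List.pyGetD_natCast arr k 0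
    have hkeyj : PySem.List.pyGetD arr (j : Int) 0 = arr.getD j 0 :=
      PySem.List.pyGetD_natCast arr j 0
    rw [idxLt_iff, hkey, hkeyj] at hij
    by_contra hge
    have hkj : k ≠ j := by
      intro rfl'
      subst rfl'
      rcases hij with h1 | ⟨h1, h2⟩ <;> omega
    have hklt : k < j := by omega
    have := h k hklt
    rcases hij with h1 | ⟨h1, h2⟩ <;> omega

/-- `recCount` as a count of record positions. -/
theorem recCount_countP (l : List Int) : ∀ (c : Int),
    recCount c l = (List.range l.length).countP
      (fun j => decide (c < l.getD j 0 ∧ ∀ i < j, l.getD i 0 < l.getD j 0)) := by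
  induction l with
  | nil => intro c; simp [recCount]
  | cons x t ih =>
    intro c
    rw [show (x :: t).length = t.length + 1 from rfl, List.range_succ_eq_map,
      List.countP_cons, List.countP_map]
    have hzero : (decide (c < (x :: t).getD 0 0 ∧ ∀ i < (0:Nat), (x :: t).getD i 0 < (x :: t).getD 0 0))
        = decide (c < x) := by simp
    have hsucc : ((fun j => decide (c < (x :: t).getD j 0 ∧
          ∀ i < j, (x :: t).getD i 0 < (x :: t).getD j 0)) ∘ Nat.succ)
        = (fun j => decide (max c x < t.getD j 0 ∧ ∀ i < j, t.getD i 0 < t.getD j 0)) := by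
      funext j
      simp only [Function.comp_apply, decide_eq_decide]
      constructor
      · intro ⟨h1, h2⟩
        have hx0 := h2 0 (Nat.succ_pos j)
        simp only [List.getD_cons_zero, List.getD_cons_succ] at hx0 h1
        refine ⟨?_, fun i hi => ?_⟩
        · rcases max_choice c x with hm | hm <;> rw [hm]
          · exact h1
          · exact hx0
        · have := h2 (i + 1) (Nat.succ_lt_succ hi)
          simpa only [List.getD_cons_succ] using this
      · intro ⟨h1, h2⟩
        have hc : c ≤ max c x := le_max_left c x
        have hxm : x ≤ max c x := le_max_right c x
        refine ⟨?_, fun i hi => ?_⟩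
        · simp only [List.getD_cons_succ]
          omega
        · cases i with
          | zero =>
            simp only [List.getD_cons_zero, List.getD_cons_succ]
            omega
          | succ i' =>
            simp only [List.getD_cons_succ]
            exact h2 i' (by omega)
    rw [hzero, hsucc]
    by_cases h : c < x
    · have hm : max c x = x := by omega
      rw [hm, ← ih x]
      simp [recCount, h]
    · have hm : max c x = c := by omega
      rw [hm, ← ih c]
      simp [recCount, h]

/-- Total record count of a nonempty list is `1 + recCount h t`. -/
theorem total_records (h : Int) (t : List Int) :
    (List.range (h :: t).length).countP (fun j => decide (natRec (h :: t) j))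
      = recCount h t + 1 := by
  rw [show (h :: t).length = t.length + 1 from rfl, List.range_succ_eq_map,
    List.countP_cons, List.countP_map]
  have hzero : decide (natRec (h :: t) 0) = true := by
    simp [natRec]
  have hsucc : ((fun j => decide (natRec (h :: t) j)) ∘ Nat.succ)
      = (fun j => decide (h < t.getD j 0 ∧ ∀ i < j, t.getD i 0 < t.getD j 0)) := by
    funext j
    simp only [Function.comp_apply, decide_eq_decide, natRec]
    constructor
    · intro hr
      have hx0 := hr 0 (Nat.succ_pos j)
      simp only [List.getD_cons_zero, List.getD_cons_succ] at hx0
      refine ⟨hx0, fun i hi => ?_⟩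
      have := hr (i + 1) (Nat.succ_lt_succ hi)
      simpa only [List.getD_cons_succ] using this
    · intro ⟨h1, h2⟩ i hi
      cases i with
      | zero => simpa only [List.getD_cons_zero, List.getD_cons_succ] using h1
      | succ i' =>
        simp only [List.getD_cons_succ]
        exact h2 i' (by omega)
  rw [hzero, hsucc, ← recCount_countP]
  simp

/-- `countP` over `pyRange 0 n 1` is `countP` over `List.range n`. -/
theorem countP_pyRange (n : Nat) (q : Int → Bool) :
    (PySem.List.pyRange 0 (n : Int) 1).countP q = (List.range n).countP (fun (k : Nat) => q (k : Int)) := by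
  rw [PySem.List.pyRange_one, List.countP_map]
  have hn : (((n : Int)) - 0).toNat = n := by omega
  rw [hn]
  refine List.countP_congr (fun k _ => ?_)
  simp [Function.comp]

/-- B's record count equals the total left-to-right record count. -/
theorem minCount_sorted_eq (arr : List Int) :
    minCount (arr.length : Int)
      (PySem.List.sorted (PySem.List.pyRange 0 (arr.length : Int) 1)
        (fun i => -(PySem.List.pyGetD arr i 0)))
      = (List.range arr.length).countP (fun j => decide (natRec arr j)) := by
  set idxs := PySem.List.sorted (PySem.List.pyRange 0 (arr.length : Int) 1)
    (fun i => -(PySem.List.pyGetD arr i 0)) with hidxs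
  have hperm : idxs.Perm (PySem.List.pyRange 0 (arr.length : Int) 1) :=
    PySem.List.sorted_perm _ _ _
  rw [minCount_countP arr idxs (sorted_idx_pairwise arr) ((arr.length : Int))]
  have hmemcong : idxs.countP
        (fun j => decide (j < (arr.length : Int) ∧ ∀ i ∈ idxs, idxLt arr i j → j < i))
      = idxs.countP
        (fun j => decide (j < (arr.length : Int) ∧
          ∀ i ∈ PySem.List.pyRange 0 (arr.length : Int) 1, idxLt arr i j → j < i)) := by
    refine List.countP_congr (fun j hj => ?_)
    simp only [decide_eq_true_eq]
    constructor
    · exact fun ⟨h1, h2⟩ => ⟨h1, fun i hi => h2 i (hperm.mem_iff.mpr hi)⟩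
    · exact fun ⟨h1, h2⟩ => ⟨h1, fun i hi => h2 i (hperm.mem_iff.mp hi)⟩
  rw [hmemcong, hperm.countP_eq, countP_pyRange]
  refine List.countP_congr (fun k hk => ?_)
  have hk2 : k < arr.length := by simpa using hk
  simp only [decide_eq_true_eq]
  exact cond_iff_natRec arr k hk2

theorem parity_string (k : Nat) :
    (if (k : Int) % 2 = 0 then "BOB" else "ANDY")
      = (if ((k + 1 : Nat) : Int) % 2 ≠ 0 then "BOB" else "ANDY") := by
  have hiff : ((k : Int) % 2 = 0) ↔ (((k + 1 : Nat) : Int) % 2 ≠ 0) := by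
    push_cast
    omega
  by_cases hk : (k : Int) % 2 = 0
  · rw [if_pos hk, if_pos (hiff.mp hk)]
  · rw [if_neg hk, if_neg (fun hh => hk (hiff.mpr hh))]

-- ===== VERDICT (by name: the statement is the Claim_ definition above) =====
theorem gamingArray_spec : Claim_equal_gamingArray := by
  intro arr _ hpre
  obtain ⟨h, t, rfl⟩ : ∃ h t, arr = h :: t := by
    cases arr with
    | nil => exact absurd rfl hpre
    | cons h t => exact ⟨h, t, rfl⟩
  unfold Spec_gamingArray gamingArray gamingArray_alt
  have h0 : PySem.List.pyGet? (h :: t) 0 = some h := by simp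
  -- A side: shift the index range, then turn the indexed loop into a loop over t
  have hshift : (PySem.List.pyRange 0 (((h :: t).length : Int) - 1) 1).foldl
      (fun (s : Int × Int) i =>
        if s.2 < PySem.List.pyGetD (h :: t) (i + 1) 0 then
          (s.1 + 1, PySem.List.pyGetD (h :: t) (i + 1) 0)
        else s) (0, h)
      = (PySem.List.pyRange 1 ((h :: t).length : Int) 1).foldl
      (fun (s : Int × Int) i =>
        if s.2 < PySem.List.pyGetD (h :: t) i 0 then
          (s.1 + 1, PySem.List.pyGetD (h :: t) i 0)
        else s) (0, h) := by
    rw [PySem.List.pyRange_one, PySem.List.pyRange_one, List.foldl_map, List.foldl_map]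
    have hn : (((h :: t).length : Int) - 1 - 0).toNat = (((h :: t).length : Int) - 1).toNat := by
      norm_num
    rw [hn]
    congr 1
    funext s k
    rw [show (0 : Int) + (k : Int) + 1 = 1 + (k : Int) by ring]
  have hfold : (PySem.List.pyRange 1 ((h :: t).length : Int) 1).foldl
      (fun (s : Int × Int) i =>
        if s.2 < PySem.List.pyGetD (h :: t) i 0 then
          (s.1 + 1, PySem.List.pyGetD (h :: t) i 0)
        else s) (0, h)
      = t.foldl (fun (s : Int × Int) x => if s.2 < x then (s.1 + 1, x) else s) (0, h) := by
    have := PySem.List.foldl_pyRange_pyGetD (xs := h :: t) (d := 0)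
      (f := fun (s : Int × Int) x => if s.2 < x then (s.1 + 1, x) else s)
      (init := (0, h)) (a := 1) (by norm_num)
    simpa using this
  simp only [h0, hshift, hfold, foldA_recCount, foldB_minCount, minCount_sorted_eq,
    total_records, zero_add]
  exact parity_string (recCount h t)
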